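-- pv_equiv track=rewrite | github.com/guilh00009/Samantha-architecture | train-125m.py | chunked_iterator
-- ===== SOURCE A (Python) =====
-- from itertools import islice, cycle
--
-- def chunked_iterator(iterable, chunk_size):
--     iterator = iter(iterable)
--     for first in iterator:
--         chunk = [first] + list(islice(iterator, chunk_size - 1))
--         yield {
--             key: [example[key] for example in chunk]
--             for key in chunk[0].keys()
--         }
-- ===== SOURCE B (Python) =====
-- def chunked_iterator(iterable, chunk_size):
--     # Incremental column builder: no chunk list is materialized; columns are
--     # extended item by item and flushed whenever the buffer count reaches chunk_size.
--     cols = None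
--     count = 0
--     for item in iterable:
--         if cols is None:
--             cols = {k: [v] for k, v in item.items()}
--             count = 1
--         else:
--             for k in cols:
--                 cols[k].append(item[k])
--             count += 1
--         if count == chunk_size:
--             yield cols
--             cols = None
--             count = 0
--     if cols is not None:
--         yield cols
-- ===== Notes on version B (the rewrite author's own statement) =====
-- stated objective: alternative
-- what changed: Replaces islice-based chunk materialization plus per-key comprehension transpose with a single-pass incremental column builder that extends each key's list item by item and flushes when the buffer count reaches chunk_size.
-- outside the precondition, e.g. on chunked_iterator([{'a': 1}], 0): A raises ValueError, B returns [{'a': [1]}]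
import Mathlib
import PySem

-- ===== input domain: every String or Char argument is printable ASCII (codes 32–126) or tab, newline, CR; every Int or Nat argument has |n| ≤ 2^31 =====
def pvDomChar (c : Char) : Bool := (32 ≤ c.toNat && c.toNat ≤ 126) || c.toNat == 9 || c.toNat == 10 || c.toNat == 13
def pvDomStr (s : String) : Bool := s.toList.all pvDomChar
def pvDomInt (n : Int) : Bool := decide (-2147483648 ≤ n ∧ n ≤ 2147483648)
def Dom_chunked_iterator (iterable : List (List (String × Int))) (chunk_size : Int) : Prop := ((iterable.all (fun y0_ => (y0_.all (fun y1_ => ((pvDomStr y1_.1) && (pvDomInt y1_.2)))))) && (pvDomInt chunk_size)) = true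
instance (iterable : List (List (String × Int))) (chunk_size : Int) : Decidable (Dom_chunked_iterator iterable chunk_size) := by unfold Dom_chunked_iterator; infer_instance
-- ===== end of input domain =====

-- B replaces islice-based chunk materialization + comprehension transpose by an
-- incremental column builder flushed each time the buffer count reaches chunk_size
-- (alternative decomposition, same cost).


-- ===== PORT A =====
-- chunk[0].keys() and the dict comprehension; example[key] is first-match lookup,
-- exact under Pre_ (each dict has Nodup keys and every key of chunk[0] is present).
def pvAchunkDict (chunk : List (List (String × Int))) : List (String × List Int) :=
  match chunk with
  | [] => []
  | first :: _ =>
      (first.map Prod.fst).map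
        (fun key => (key, chunk.map (fun ex => (ex.lookup key).getD 0)))

def chunked_iterator (iterable : List (List (String × Int))) (chunk_size : Int) : List (List (String × List Int)) :=
  match iterable with
  | [] => []
  | first :: rest =>
      -- chunk = [first] + list(islice(iterator, chunk_size - 1))
      let chunk := first :: rest.take (chunk_size - 1).toNat
      pvAchunkDict chunk :: chunked_iterator (rest.drop (chunk_size - 1).toNat) chunk_size
termination_by iterable.length
decreasing_by simp only [List.length_cons, List.length_drop]; omega

-- ===== PORT B =====
-- state: (yielded chunks, current columns or none, current buffer count)
def pvBExtend (cols : List (String × List Int)) (item : List (String × Int)) : List (String × List Int) :=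
  cols.map (fun kl => (kl.1, kl.2 ++ [(item.lookup kl.1).getD 0]))

def pvBStep (chunk_size : Int)
    (st : List (List (String × List Int)) × Option (List (String × List Int)) × Int)
    (item : List (String × Int)) :
    List (List (String × List Int)) × Option (List (String × List Int)) × Int :=
  let (out, cols?, count) := st
  let (cols, count) :=
    match cols? with
    | none => (item.map (fun kv => (kv.1, [kv.2])), (1 : Int))
    | some cols => (pvBExtend cols item, count + 1)
  if count = chunk_size then (out ++ [cols], none, 0) else (out, some cols, count)

def chunked_iterator_alt (iterable : List (List (String × Int))) (chunk_size : Int) : List (List (String × List Int)) :=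
  let st := iterable.foldl (pvBStep chunk_size) ([], none, 0)
  match st.2.1 with
  | none => st.1
  | some cols => st.1 ++ [cols]

-- ===== PRECONDITION & SPEC =====
-- Pre_ excludes: (i) non-empty input with chunk_size < 1, where islice raises ValueError;
-- (ii) chunks whose first dict has a key missing from a later dict of the chunk (KeyError);
-- (iii) association lists with duplicate keys, a defensible corner where the Python dict
-- argument collapses duplicates (last value wins) while the assoc-list convention reads
-- the first match.
def Pre_chunked_iterator (iterable : List (List (String × Int))) (chunk_size : Int) : Prop :=
  (iterable = [] ∨ 1 ≤ chunk_size) ∧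
  (∀ d ∈ iterable, (d.map Prod.fst).Nodup) ∧
  (∀ c ∈ List.toChunks chunk_size.toNat iterable, ∀ d ∈ c,
      ∀ k ∈ c.headI.map Prod.fst, k ∈ d.map Prod.fst)
instance (iterable : List (List (String × Int))) (chunk_size : Int) : Decidable (Pre_chunked_iterator iterable chunk_size) := by unfold Pre_chunked_iterator; infer_instance

def pvWitness_chunked_iterator : (List (List (String × Int))) × Int :=
  ([[("a", 1), ("b", 2)], [("a", 3), ("b", 4)], [("a", 5), ("b", 6)]], 2)

def Spec_chunked_iterator (iterable : List (List (String × Int))) (chunk_size : Int) (out : List (List (String × List Int))) : Prop := out = chunked_iterator_alt iterable chunk_size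
instance (iterable : List (List (String × Int))) (chunk_size : Int) (out : List (List (String × List Int))) : Decidable (Spec_chunked_iterator iterable chunk_size out) := by unfold Spec_chunked_iterator; infer_instance

-- ===== CLAIM (what is proved, stated in full; the proofs are below) =====
def Claim_equal_chunked_iterator : Prop := ∀ (iterable : List (List (String × Int))) (chunk_size : Int), Dom_chunked_iterator iterable chunk_size → Pre_chunked_iterator iterable chunk_size → Spec_chunked_iterator iterable chunk_size (chunked_iterator iterable chunk_size)

-- ===== LEMMAS AND PROOFS =====

lemma chunkA_nil (cs : Int) : chunked_iterator [] cs = [] := by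
  rw [chunked_iterator.eq_def]

lemma chunkA_cons (cs : Int) (first : List (String × Int)) (rest : List (List (String × Int))) :
    chunked_iterator (first :: rest) cs =
      pvAchunkDict (first :: rest.take (cs - 1).toNat) ::
        chunked_iterator (rest.drop (cs - 1).toNat) cs := by
  rw [chunked_iterator.eq_def]

-- folding pvBExtend over t appends t's lookups to every column
lemma pvExtend_foldl (t : List (List (String × Int))) (K : List String) (g : String → List Int) :
    t.foldl pvBExtend (K.map (fun k => (k, g k))) =
      K.map (fun k => (k, g k ++ t.map (fun ex => (ex.lookup k).getD 0))) := by
  induction t generalizing g with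
  | nil => simp
  | cons x t ih =>
      simp only [List.foldl_cons, pvBExtend, List.map_map]
      rw [show (fun kl : String × List Int => (kl.1, kl.2 ++ [(x.lookup kl.1).getD 0])) ∘
            (fun k => (k, g k)) = fun k => (k, g k ++ [(x.lookup k).getD 0]) from rfl,
          ih (fun k => g k ++ [(x.lookup k).getD 0])]
      simp

-- first-match lookup of a present key in a Nodup-keyed association list
lemma lookup_self (first : List (String × Int)) (hnd : (first.map Prod.fst).Nodup) :
    ∀ kv ∈ first, first.lookup kv.1 = some kv.2 := by
  induction first with
  | nil => simp
  | cons p rest ih =>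
      intro kv hkv
      simp only [List.map_cons, List.nodup_cons] at hnd
      rcases List.mem_cons.mp hkv with h | h
      · subst h; simp [List.lookup]
      · have hne : (kv.1 == p.1) = false := by
          refine beq_eq_false_iff_ne.mpr ?_
          intro he
          exact hnd.1 (he ▸ List.mem_map_of_mem h)
        simp [List.lookup, hne, ih hnd.2 kv h]

lemma pvInitCols (first : List (String × Int)) (hnd : (first.map Prod.fst).Nodup) :
    first.map (fun kv => (kv.1, [kv.2])) =
      (first.map Prod.fst).map (fun k => (k, [(first.lookup k).getD 0])) := by
  rw [List.map_map]
  apply List.map_congr_left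
  intro kv hkv
  simp only [Function.comp]
  rw [lookup_self first hnd kv hkv]
  rfl

-- the transposed columns of a whole chunk, as B builds them, equal A's dict comprehension
lemma pvChunkCols (first : List (String × Int)) (t : List (List (String × Int)))
    (hnd : (first.map Prod.fst).Nodup) :
    t.foldl pvBExtend (first.map (fun kv => (kv.1, [kv.2]))) = pvAchunkDict (first :: t) := by
  rw [pvInitCols first hnd, pvExtend_foldl t (first.map Prod.fst)
    (fun k => [(first.lookup k).getD 0])]
  simp [pvAchunkDict]

-- folding the tail of a partially filled buffer: flush exactly when the count reaches chunk_size
lemma pvInner (cs : Int) (t : List (List (String × Int))) :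
    ∀ (out : List (List (String × List Int))) (cols : List (String × List Int)) (m : Int),
      m < cs → m + (t.length : Int) ≤ cs →
      t.foldl (pvBStep cs) (out, some cols, m) =
        (if m + (t.length : Int) = cs then (out ++ [t.foldl pvBExtend cols], none, 0)
         else (out, some (t.foldl pvBExtend cols), m + (t.length : Int))) := by
  induction t with
  | nil =>
      intro out cols m hlt _
      simp only [List.foldl_nil, List.length_nil, Nat.cast_zero, add_zero,
        if_neg (show ¬ m = cs by omega)]
  | cons x t ih =>
      intro out cols m hlt hle
      simp only [List.foldl_cons]
      have hstep : pvBStep cs (out, some cols, m) x =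
          if m + 1 = cs then (out ++ [pvBExtend cols x], none, 0)
          else (out, some (pvBExtend cols x), m + 1) := by
        simp [pvBStep]
      rw [hstep]
      by_cases hflush : m + 1 = cs
      · have ht : t = [] := by
          have hl : (t.length : Int) ≤ 0 := by
            simp only [List.length_cons] at hle; push_cast at hle; omega
          simpa using (show t.length = 0 by omega)
        subst ht
        simp only [if_pos hflush, List.foldl_nil, List.length_cons, List.length_nil]
        rw [if_pos (by push_cast; omega)]
      · rw [if_neg hflush]
        have hle' : m + 1 + (t.length : Int) ≤ cs := by
          simp only [List.length_cons] at hle; push_cast at hle; omega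
        rw [ih out (pvBExtend cols x) (m + 1) (by omega) hle']
        have harith : m + 1 + (t.length : Int) = m + ((t.length + 1 : Nat) : Int) := by
          push_cast; ring
        simp only [List.length_cons, ← harith]

-- folding one whole chunk (first element then at most cs - 1 more) from an empty buffer
lemma pvChunkFold (cs : Int) (first : List (String × Int)) (t : List (List (String × Int)))
    (out : List (List (String × List Int)))
    (hle : 1 + (t.length : Int) ≤ cs) :
    (first :: t).foldl (pvBStep cs) (out, none, 0) =
      (if 1 + (t.length : Int) = cs then
        (out ++ [t.foldl pvBExtend (first.map (fun kv => (kv.1, [kv.2])))], none, 0)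
       else (out, some (t.foldl pvBExtend (first.map (fun kv => (kv.1, [kv.2])))),
             1 + (t.length : Int))) := by
  simp only [List.foldl_cons]
  have hstep : pvBStep cs (out, none, 0) first =
      if (1:Int) = cs then (out ++ [first.map (fun kv => (kv.1, [kv.2]))], none, 0)
      else (out, some (first.map (fun kv => (kv.1, [kv.2]))), 1) := by
    simp [pvBStep]
  rw [hstep]
  by_cases h1 : (1:Int) = cs
  · have ht : t = [] := by
      have : (t.length : Int) ≤ 0 := by omega
      simpa using (show t.length = 0 by omega)
    subst ht
    simp only [if_pos h1, List.foldl_nil, List.length_nil, Nat.cast_zero, add_zero]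
  · rw [if_neg h1]
    exact pvInner cs t out _ 1 (by omega) hle

def pvBFinal (st : List (List (String × List Int)) × Option (List (String × List Int)) × Int) :
    List (List (String × List Int)) :=
  match st.2.1 with
  | none => st.1
  | some cols => st.1 ++ [cols]

-- main invariant: B's fold-plus-final-flush from any yielded prefix equals that prefix ++ A
lemma pvMain (cs : Int) (hcs : 1 ≤ cs) :
    ∀ (N : Nat) (l : List (List (String × Int))) (out : List (List (String × List Int))),
      l.length ≤ N → (∀ d ∈ l, (d.map Prod.fst).Nodup) →
      pvBFinal (l.foldl (pvBStep cs) (out, none, 0)) = out ++ chunked_iterator l cs := by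
  intro N
  induction N with
  | zero =>
      intro l out hlen _
      have : l = [] := List.eq_nil_of_length_eq_zero (by omega)
      subst this
      simp [pvBFinal, chunkA_nil]
  | succ N ih =>
      intro l out hlen hnd
      match l with
      | [] => simp [pvBFinal, chunkA_nil]
      | first :: rest =>
        have hsplit : rest = rest.take (cs - 1).toNat ++ rest.drop (cs - 1).toNat :=
          (List.take_append_drop _ _).symm
        set t := rest.take (cs - 1).toNat with ht
        set r := rest.drop (cs - 1).toNat with hr
        have htlen : (t.length : Int) ≤ cs - 1 := by
          have h0 : t.length ≤ (cs - 1).toNat := by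
            rw [ht]; exact List.length_take_le (cs - 1).toNat rest
          omega
        have hfold : (first :: rest).foldl (pvBStep cs) (out, none, 0) =
            r.foldl (pvBStep cs) ((first :: t).foldl (pvBStep cs) (out, none, 0)) := by
          conv_lhs => rw [show first :: rest = (first :: t) ++ r by
            rw [List.cons_append, ← hsplit]]
          rw [List.foldl_append]
        have hndfirst : (first.map Prod.fst).Nodup := hnd first (by simp)
        have hT : t.foldl pvBExtend (first.map (fun kv => (kv.1, [kv.2]))) =
            pvAchunkDict (first :: t) := pvChunkCols first t hndfirst
        have hA : chunked_iterator (first :: rest) cs =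
            pvAchunkDict (first :: t) :: chunked_iterator r cs := chunkA_cons cs first rest
        rw [hfold, pvChunkFold cs first t out (by omega)]
        by_cases hfull : 1 + (t.length : Int) = cs
        · rw [if_pos hfull]
          have hrlen : r.length ≤ N := by
            have h1 : r.length ≤ rest.length := by
              simp [hr]
            simp only [List.length_cons] at hlen; omega
          rw [ih r (out ++ [t.foldl pvBExtend (first.map (fun kv => (kv.1, [kv.2])))]) hrlen
            (fun d hd => hnd d (by
              rw [hsplit]
              exact List.mem_cons_of_mem _ (List.mem_append_right _ hd)))]
          rw [hT, hA]
          simp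
        · rw [if_neg hfull]
          have hrnil : r = [] := by
            have hmin : t.length = min (cs - 1).toNat rest.length := by
              simp [ht]
            rw [hr, List.drop_eq_nil_iff]
            omega
          rw [hrnil]
          simp only [List.foldl_nil, pvBFinal, hT, hA, hrnil, chunkA_nil]

-- ===== VERDICT (by name: the statement is the Claim_ definition above) =====
theorem chunked_iterator_spec : Claim_equal_chunked_iterator := by
  intro iterable cs _ hpre
  unfold Spec_chunked_iterator
  obtain ⟨hcs, hnd, _⟩ := hpre
  match iterable with
  | [] => simp [chunkA_nil, chunked_iterator_alt]
  | first :: rest =>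
    have hcs1 : 1 ≤ cs := by
      rcases hcs with h | h
      · exact absurd h (by simp)
      · exact h
    have hmain := pvMain cs hcs1 (first :: rest).length (first :: rest) [] le_rfl hnd
    unfold chunked_iterator_alt
    unfold pvBFinal at hmain
    simpa using hmain.symm
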